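-- pv_equiv track=rewrite | github.com/VitaliiStorozh/Python_marathon_git | 1_sprint/Tasks/s1.1.py | kthTerm
-- ===== SOURCE A (Python) =====
-- def kthTerm(n, k):
--     a = []
--     b = a.append
--     for i in range(9):
--         b(n**i)
--         l = len(a)-1
--         for j in range(l):
--             b(a[l]+a[j])
--     return a[k-1]
-- ===== SOURCE B (Python) =====
-- def kthTerm(n, k):
--     def term(m):
--         p = m.bit_length() - 1
--         rest = m - (1 << p)
--         return n ** p if rest == 0 else n ** p + term(rest)
--     return [term(m) for m in range(1, 512)][k - 1]
-- ===== Notes on version B (the rewrite author's own statement) =====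
-- stated objective: alternative
-- what changed: B computes each element independently from the binary decomposition of its 1-based position (term(m) = sum of n**i over set bits of m, added high bit first) instead of A's incremental doubling that builds every new element by adding the newest power to each earlier stored element.
import Mathlib
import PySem

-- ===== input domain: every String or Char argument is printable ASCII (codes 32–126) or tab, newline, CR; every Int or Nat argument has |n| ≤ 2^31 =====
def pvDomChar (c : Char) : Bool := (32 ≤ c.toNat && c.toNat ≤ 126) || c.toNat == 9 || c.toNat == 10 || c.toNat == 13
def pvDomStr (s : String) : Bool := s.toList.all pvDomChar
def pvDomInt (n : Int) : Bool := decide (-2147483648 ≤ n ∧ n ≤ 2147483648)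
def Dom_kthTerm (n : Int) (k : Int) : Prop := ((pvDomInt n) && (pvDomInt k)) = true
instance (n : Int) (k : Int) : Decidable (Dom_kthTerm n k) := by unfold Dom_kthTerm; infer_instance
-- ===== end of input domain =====

-- B recomputes each of the 511 elements directly from the set bits of its position instead of A's
-- incremental doubling build; objective: alternative (same cost, genuinely different construction).
-- ===== PORT A =====
-- inner loop 'for j in range(l): b(a[l]+a[j])' (a grows, but reads are at indices < original length)
def kthTermInner (l : Nat) (a : List Int) : List Int :=
  (List.range l).foldl (fun acc j => acc ++ [acc.getD l 0 + acc.getD j 0]) a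

def kthTermBuild (n : Int) : List Int :=
  (List.range 9).foldl (fun a i =>
    let a := a ++ [n ^ i]
    kthTermInner (a.length - 1) a) []

def kthTerm (n : Int) (k : Int) : Int :=
  (PySem.List.pyGet? (kthTermBuild n) (k - 1)).getD 0

-- ===== PORT B =====
-- term(m): p = highest set bit of m; n**p plus term of the remaining lower bits
def kthTermOf (n : Int) (m : Nat) : Int :=
  if _h : m = 0 then 0
  else if m - 2 ^ Nat.log2 m = 0 then n ^ Nat.log2 m
  else n ^ Nat.log2 m + kthTermOf n (m - 2 ^ Nat.log2 m)
termination_by m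
decreasing_by
  have h1 : 0 < 2 ^ Nat.log2 m := Nat.two_pow_pos m.log2
  omega

def kthTerm_alt (n : Int) (k : Int) : Int :=
  (PySem.List.pyGet? ((List.range 511).map (fun r => kthTermOf n (r + 1))) (k - 1)).getD 0

-- ===== PRECONDITION & SPEC =====
-- Pre_ excludes exactly the k for which a[k-1] raises IndexError in A (list length is 511).
def Pre_kthTerm (n : Int) (k : Int) : Prop := -510 ≤ k ∧ k ≤ 511
instance (n : Int) (k : Int) : Decidable (Pre_kthTerm n k) := by unfold Pre_kthTerm; infer_instance
def pvWitness_kthTerm : Int × Int := (2, 3)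

def Spec_kthTerm (n : Int) (k : Int) (out : Int) : Prop := out = kthTerm_alt n k
instance (n : Int) (k : Int) (out : Int) : Decidable (Spec_kthTerm n k out) := by unfold Spec_kthTerm; infer_instance

-- ===== CLAIM (what is proved, stated in full; the proofs are below) =====
def Claim_equal_kthTerm : Prop := ∀ (n : Int) (k : Int), Dom_kthTerm n k → Pre_kthTerm n k → Spec_kthTerm n k (kthTerm n k)

-- ===== LEMMAS AND PROOFS =====

theorem log2_pow_add (i r : Nat) (hr : r < 2 ^ i) : Nat.log2 (2 ^ i + r) = i := by
  rw [Nat.log2_eq_log_two]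
  exact Nat.log_eq_of_pow_le_of_lt_pow (Nat.le_add_right _ _) (by rw [pow_succ]; omega)

theorem termOf_high (n : Int) (i r : Nat) (hr : r < 2 ^ i) :
    kthTermOf n (2 ^ i + r) = n ^ i + kthTermOf n r := by
  have hpos : 0 < 2 ^ i := Nat.two_pow_pos i
  rw [kthTermOf, log2_pow_add i r hr]
  have hsub : 2 ^ i + r - 2 ^ i = r := by omega
  rw [hsub, dif_neg (by omega : ¬ 2 ^ i + r = 0)]
  by_cases h0 : r = 0
  · subst h0
    rw [if_pos rfl, kthTermOf]
    simp
  · rw [if_neg h0]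

theorem mapf_getD (n : Int) (L j : Nat) (hj : j < L) :
    ((List.range L).map (fun r => kthTermOf n (r + 1))).getD j 0 = kthTermOf n (j + 1) := by
  rw [List.getD_eq_getElem?_getD, List.getElem?_map, List.getElem?_range hj]
  rfl

theorem inner_spec (a : List Int) (l t : Nat) (hl : l < a.length) (ht : t ≤ l) :
    (List.range t).foldl (fun acc j => acc ++ [acc.getD l 0 + acc.getD j 0]) a
      = a ++ (List.range t).map (fun j => a.getD l 0 + a.getD j 0) := by
  induction t with
  | zero => simp
  | succ t ih =>
    rw [List.range_succ, List.foldl_append, ih (by omega), List.map_append, List.foldl_cons]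
    rw [List.getD_append _ _ _ _ hl, List.getD_append _ _ _ _ (by omega)]
    simp [List.append_assoc]

theorem outer_spec (n : Int) (i : Nat) :
    (List.range i).foldl (fun a i =>
      let a := a ++ [n ^ i]
      kthTermInner (a.length - 1) a) []
      = (List.range (2 ^ i - 1)).map (fun r => kthTermOf n (r + 1)) := by
  induction i with
  | zero => simp
  | succ i ih =>
    rw [List.range_succ, List.foldl_append, ih, List.foldl_cons, List.foldl_nil]
    set A0 := 2 ^ i - 1 with hA0
    have hpos : 0 < 2 ^ i := Nat.two_pow_pos i
    set prev := (List.range A0).map (fun r => kthTermOf n (r + 1)) with hprev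
    have hlen : prev.length = A0 := by rw [hprev]; simp
    have hlen2 : (prev ++ [n ^ i]).length = A0 + 1 := by simp [hlen]
    show kthTermInner ((prev ++ [n ^ i]).length - 1) (prev ++ [n ^ i]) = _
    rw [hlen2]
    simp only [Nat.add_sub_cancel]
    unfold kthTermInner
    rw [inner_spec (prev ++ [n ^ i]) A0 A0 (by rw [hlen2]; omega) (le_refl _)]
    have hgl : (prev ++ [n ^ i]).getD A0 0 = n ^ i := by
      rw [List.getD_eq_getElem?_getD, List.getElem?_append_right (by omega), hlen]
      simp
    have hbody : (List.range A0).map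
          (fun j => (prev ++ [n ^ i]).getD A0 0 + (prev ++ [n ^ i]).getD j 0)
        = (List.range A0).map (fun j => kthTermOf n (A0 + (j + 1) + 1)) := by
      apply List.map_congr_left
      intro j hj
      rw [List.mem_range] at hj
      have h2 : A0 + (j + 1) + 1 = 2 ^ i + (j + 1) := by omega
      rw [hgl, List.getD_append _ _ _ _ (by rw [hlen]; omega), hprev, mapf_getD n A0 j hj,
          h2, termOf_high n i (j + 1) (by omega)]
    rw [hbody, List.append_assoc]
    have hsplit : 2 ^ (i + 1) - 1 = A0 + (A0 + 1) := by rw [pow_succ]; omega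
    rw [hsplit, List.range_add, List.map_append]
    congr 1
    rw [List.map_map]
    simp only [Function.comp_def]
    rw [List.range_succ_eq_map, List.map_cons, List.map_map, List.singleton_append]
    congr 1
    · have h3 : A0 + 0 + 1 = 2 ^ i + 0 := by omega
      rw [h3, termOf_high n i 0 hpos, kthTermOf]
      simp

theorem build_eq (n : Int) :
    kthTermBuild n = (List.range 511).map (fun r => kthTermOf n (r + 1)) := by
  have h511 : (511 : Nat) = 2 ^ 9 - 1 := by norm_num
  rw [h511]
  exact outer_spec n 9

-- ===== VERDICT (by name: the statement is the Claim_ definition above) =====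
theorem kthTerm_spec : Claim_equal_kthTerm := by
  intro n k _ _
  unfold Spec_kthTerm kthTerm kthTerm_alt
  rw [build_eq]
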